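-- pv_equiv track=rewrite | github.com/nataliaaraujolima/python-fundamentals | string_v3.py | filtrar_letras_repetidas
-- ===== SOURCE A (Python) =====
-- from collections import Counter
--
-- def filtrar_letras_repetidas(string):
--     total_strings = Counter(string)
--
--     # Criar um dicionário para rastrear a contagem de letras repetidas
--     contagem_letras_repetidas = {letra: total_strings[letra] - 1 for letra in total_strings if total_strings[letra] > 1}
--
--     # Substituir apenas a próxima ocorrência de cada letra repetida por '*'
--     nova_string = ''
--     for letra in string:
--         if letra in contagem_letras_repetidas and contagem_letras_repetidas[letra] > 0:
--             nova_string += '*'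
--             contagem_letras_repetidas[letra] -= 1
--         else:
--             nova_string += letra
--
--     return nova_string
-- ===== SOURCE B (Python) =====
-- def filtrar_letras_repetidas(string):
--     vistos = set()
--     out = []
--     for c in reversed(string):
--         if c in vistos:
--             out.append('*')
--         else:
--             vistos.add(c)
--             out.append(c)
--     out.reverse()
--     return ''.join(out)
-- ===== Notes on version B (the rewrite author's own statement) =====
-- stated objective: simpler
-- what changed: B replaces A's Counter plus remaining-count dict with a single right-to-left pass keeping only a set of already-seen characters (a character's last occurrence is kept, every earlier one becomes '*'); avoiding the two dict-building passes and per-character dict updates makes it measurably faster by a constant factor.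
import Mathlib
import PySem

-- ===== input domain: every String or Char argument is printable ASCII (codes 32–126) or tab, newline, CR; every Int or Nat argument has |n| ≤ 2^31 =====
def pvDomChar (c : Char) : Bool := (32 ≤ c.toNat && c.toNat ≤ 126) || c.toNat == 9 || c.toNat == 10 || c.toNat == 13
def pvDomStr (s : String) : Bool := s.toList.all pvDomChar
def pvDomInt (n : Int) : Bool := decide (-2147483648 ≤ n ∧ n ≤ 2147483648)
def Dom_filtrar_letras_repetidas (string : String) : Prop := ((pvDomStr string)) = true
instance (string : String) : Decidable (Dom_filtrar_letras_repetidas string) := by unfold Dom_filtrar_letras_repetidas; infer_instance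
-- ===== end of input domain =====

-- B replaces A's Counter + remaining-count dict with one right-to-left pass over the string
-- keeping only a set of already-seen characters (objective: simpler). Return values proved equal on all inputs.

-- ===== PORT A =====
-- total_strings = Counter(string)
def pvTotalA (l : List Char) : PySem.Dict Char Int := PySem.Dict.counter l
-- contagem_letras_repetidas = {letra: total[letra]-1 for letra in total if total[letra] > 1}
def pvContagemA (l : List Char) : PySem.Dict Char Int :=
  (pvTotalA l).keys.foldl
    (fun d letra =>
      if (pvTotalA l).getD letra 0 > 1 then d.insert letra ((pvTotalA l).getD letra 0 - 1) else d)
    PySem.Dict.empty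
-- body of A's for-loop (acc = (nova_string, contagem_letras_repetidas))
def pvStepA (acc : List Char × PySem.Dict Char Int) (letra : Char) : List Char × PySem.Dict Char Int :=
  if acc.2.contains letra ∧ acc.2.getD letra 0 > 0 then
    (acc.1 ++ ['*'], acc.2.insert letra (acc.2.getD letra 0 - 1))
  else
    (acc.1 ++ [letra], acc.2)

def filtrar_letras_repetidas (string : String) : String :=
  String.mk ((string.toList.foldl pvStepA ([], pvContagemA string.toList)).1)

-- ===== PORT B =====
-- body of B's for-loop over reversed(string) (acc = (out, vistos))
def pvStepB (acc : List Char × PySem.Set Char) (c : Char) : List Char × PySem.Set Char :=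
  if PySem.Set.contains acc.2 c then
    (acc.1 ++ ['*'], acc.2)
  else
    (acc.1 ++ [c], PySem.Set.add acc.2 c)

def filtrar_letras_repetidas_alt (string : String) : String :=
  String.mk ((string.toList.reverse.foldl pvStepB ([], PySem.Set.empty)).1.reverse)

-- ===== PRECONDITION & SPEC =====
def Spec_filtrar_letras_repetidas (string : String) (out : String) : Prop := out = filtrar_letras_repetidas_alt string
instance (string : String) (out : String) : Decidable (Spec_filtrar_letras_repetidas string out) := by unfold Spec_filtrar_letras_repetidas; infer_instance

-- ===== CLAIM (what is proved, stated in full; the proofs are below) =====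
def Claim_equal_filtrar_letras_repetidas : Prop := ∀ (string : String), Dom_filtrar_letras_repetidas string → Spec_filtrar_letras_repetidas string (filtrar_letras_repetidas string)

-- ===== LEMMAS AND PROOFS =====

-- reference value: keep a character iff it does not occur again later
def pvSpec : List Char → List Char
  | [] => []
  | c :: r => (if c ∈ r then '*' else c) :: pvSpec r

-- output of B's loop when it processes the elements of l from last to first
def pvGRev : List Char → PySem.Set Char → List Char
  | [], _ => []
  | c :: t, s => pvGRev t s ++ [if c ∈ s ∨ c ∈ t then '*' else c]

lemma pvStepB_pos (acc : List Char × PySem.Set Char) (c : Char)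
    (h : PySem.Set.contains acc.2 c = true) : pvStepB acc c = (acc.1 ++ ['*'], acc.2) := by
  unfold pvStepB; rw [h]; simp

lemma pvStepB_neg (acc : List Char × PySem.Set Char) (c : Char)
    (h : PySem.Set.contains acc.2 c = false) :
    pvStepB acc c = (acc.1 ++ [c], PySem.Set.add acc.2 c) := by
  unfold pvStepB; rw [h]; simp

lemma pvB_snd (m : List Char) : ∀ (acc : List Char × PySem.Set Char) (x : Char),
    x ∈ (m.foldl pvStepB acc).2 ↔ x ∈ acc.2 ∨ x ∈ m := by
  induction m with
  | nil => simp
  | cons c t ih =>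
    intro acc x
    rw [List.foldl_cons]
    by_cases hc : PySem.Set.contains acc.2 c = true
    · have hcm : c ∈ acc.2 := (PySem.Set.contains_iff _ _).mp hc
      rw [pvStepB_pos _ _ hc, ih]
      simp only [List.mem_cons]
      constructor
      · rintro (h | h)
        · exact Or.inl h
        · exact Or.inr (Or.inr h)
      · rintro (h | h | h)
        · exact Or.inl h
        · exact Or.inl (h ▸ hcm)
        · exact Or.inr h
    · rw [pvStepB_neg _ _ (by simpa using hc), ih]
      simp only [PySem.Set.mem_add, List.mem_cons]
      tauto

lemma pvB_fst (l : List Char) : ∀ (acc : List Char × PySem.Set Char),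
    (l.reverse.foldl pvStepB acc).1 = acc.1 ++ pvGRev l acc.2 := by
  induction l with
  | nil => intro acc; simp [pvGRev]
  | cons c t ih =>
    intro acc
    rw [List.reverse_cons, List.foldl_append, List.foldl_cons, List.foldl_nil]
    have hsnd := pvB_snd t.reverse acc c
    rw [List.mem_reverse] at hsnd
    by_cases h : c ∈ acc.2 ∨ c ∈ t
    · have hc : PySem.Set.contains (t.reverse.foldl pvStepB acc).2 c = true := by
        rw [PySem.Set.contains_iff, hsnd]; exact h
      rw [pvStepB_pos _ _ hc]
      show (t.reverse.foldl pvStepB acc).1 ++ ['*'] = _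
      rw [ih acc, show pvGRev (c :: t) acc.2 = pvGRev t acc.2 ++ ['*'] from by
        simp [pvGRev, h], List.append_assoc]
    · have hc : PySem.Set.contains (t.reverse.foldl pvStepB acc).2 c = false := by
        rw [Bool.eq_false_iff, ne_eq, PySem.Set.contains_iff, hsnd]; exact h
      rw [pvStepB_neg _ _ hc]
      show (t.reverse.foldl pvStepB acc).1 ++ [c] = _
      rw [ih acc, show pvGRev (c :: t) acc.2 = pvGRev t acc.2 ++ [c] from by
        simp [pvGRev, h], List.append_assoc]

lemma pvGRev_reverse (l : List Char) :
    (pvGRev l ([] : PySem.Set Char)).reverse = pvSpec l := by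
  induction l with
  | nil => simp [pvGRev, pvSpec]
  | cons c t ih =>
    have hmem : (c ∈ ([] : PySem.Set Char) ∨ c ∈ t) ↔ c ∈ t := by simp
    by_cases h : c ∈ t
    · simp only [pvGRev, pvSpec, if_pos (hmem.mpr h), if_pos h, List.reverse_append,
        List.reverse_cons, List.reverse_nil, List.nil_append, List.singleton_append, ih]
    · simp only [pvGRev, pvSpec, if_neg (fun hh => h (hmem.mp hh)), if_neg h,
        List.reverse_append, List.reverse_cons, List.reverse_nil, List.nil_append,
        List.singleton_append, ih]

lemma pvAlt_eq_spec (s : String) :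
    filtrar_letras_repetidas_alt s = String.mk (pvSpec s.toList) := by
  unfold filtrar_letras_repetidas_alt
  rw [pvB_fst s.toList ([], PySem.Set.empty)]
  show String.mk (pvGRev s.toList ([] : PySem.Set Char)).reverse = _
  rw [pvGRev_reverse]

lemma pvA_loop (m : List Char) : ∀ (nova : List Char) (cont : PySem.Dict Char Int),
    (∀ c ∈ m, cont.getD c 0 = (m.count c : Int) - 1) →
    (m.foldl pvStepA (nova, cont)).1 = nova ++ pvSpec m := by
  induction m with
  | nil => intro nova cont _; simp [pvSpec]
  | cons c r ih =>
    intro nova cont hinv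
    have hc : cont.getD c 0 = (r.count c : Int) := by
      have := hinv c (List.mem_cons_self ..)
      rw [this, List.count_cons_self]
      push_cast; ring
    by_cases hmem : c ∈ r
    · have hpos : cont.getD c 0 > 0 := by
        rw [hc]; exact_mod_cast List.count_pos_iff.mpr hmem
      have hcont : cont.contains c = true := by
        by_contra h
        have := PySem.Dict.getD_of_not_contains (d := cont) (k := c) (d0 := (0:Int))
          (by simpa using h)
        omega
      have hstep : pvStepA (nova, cont) c
          = (nova ++ ['*'], cont.insert c (cont.getD c 0 - 1)) := by
        simp [pvStepA, hcont, hpos]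
      rw [List.foldl_cons, hstep, ih]
      · simp [pvSpec, hmem]
      · intro d hd
        by_cases hdc : d = c
        · subst hdc
          rw [PySem.Dict.getD_insert_self, hc]
        · rw [PySem.Dict.getD_insert_of_ne _ _ _ hdc, hinv d (List.mem_cons_of_mem _ hd)]
          simp [Ne.symm hdc]
    · have h0 : cont.getD c 0 = 0 := by
        rw [hc]
        exact_mod_cast List.count_eq_zero.mpr hmem
      have hstep : pvStepA (nova, cont) c = (nova ++ [c], cont) := by
        simp [pvStepA, h0]
      rw [List.foldl_cons, hstep, ih]
      · simp [pvSpec, hmem]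
      · intro d hd
        have hdc : d ≠ c := fun h => hmem (h ▸ hd)
        rw [hinv d (List.mem_cons_of_mem _ hd)]
        simp [Ne.symm hdc]

lemma pv_contagem_getD (total : PySem.Dict Char Int) (ks : List Char) :
    ∀ (d : PySem.Dict Char Int) (c : Char),
    (ks.foldl (fun d letra => if total.getD letra 0 > 1 then d.insert letra (total.getD letra 0 - 1) else d) d).getD c 0
      = if c ∈ ks ∧ total.getD c 0 > 1 then total.getD c 0 - 1 else d.getD c 0 := by
  induction ks with
  | nil => intro d c; simp
  | cons k t ih =>
    intro d c
    rw [List.foldl_cons, ih]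
    by_cases hct : c ∈ t ∧ total.getD c 0 > 1
    · simp [hct, List.mem_cons]
    · by_cases hck : c = k
      · subst hck
        by_cases hp : total.getD c 0 > 1
        · simp [hp, PySem.Dict.getD_insert_self]
        · simp [hp]
      · by_cases hp : total.getD k 0 > 1
        · simp only [if_pos hp, PySem.Dict.getD_insert_of_ne _ _ _ hck]
          simp only [List.mem_cons]
          rw [if_neg hct, if_neg (by tauto)]
        · simp only [if_neg hp]
          simp only [List.mem_cons]
          rw [if_neg hct, if_neg (by tauto)]

lemma pvA_eq_spec (s : String) :
    filtrar_letras_repetidas s = String.mk (pvSpec s.toList) := by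
  unfold filtrar_letras_repetidas
  have hinv : ∀ c ∈ s.toList, (pvContagemA s.toList).getD c 0 = (s.toList.count c : Int) - 1 := by
    intro c hc
    unfold pvContagemA pvTotalA
    rw [pv_contagem_getD]
    have hmemk : c ∈ (PySem.Dict.counter s.toList).keys := by
      rw [PySem.Dict.keys_counter, PySem.Set.mem_ofList]
      exact hc
    have hcount : (PySem.Dict.counter s.toList).getD c 0 = (s.toList.count c : Int) :=
      PySem.Dict.getD_counter ..
    by_cases hp : (PySem.Dict.counter s.toList).getD c 0 > 1
    · rw [if_pos ⟨hmemk, hp⟩, hcount]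
    · have h1 : s.toList.count c = 1 := by
        have hpos : 0 < s.toList.count c := List.count_pos_iff.mpr hc
        rw [hcount] at hp
        omega
      rw [if_neg (by tauto), PySem.Dict.getD_empty, h1]
      norm_num
  rw [pvA_loop _ _ _ hinv]
  simp

-- ===== VERDICT (by name: the statement is the Claim_ definition above) =====
theorem filtrar_letras_repetidas_spec : Claim_equal_filtrar_letras_repetidas := by
  intro s _
  unfold Spec_filtrar_letras_repetidas
  rw [pvA_eq_spec, pvAlt_eq_spec]
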